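-- pv_equiv track=rewrite | github.com/FPSdudeman/MetaCodePuzzles | DirectorOfPhotography.py | getArtisticPhotographCount
-- ===== SOURCE A (Python) =====
-- def getArtisticPhotographCount(N: int, C: str, X: int, Y: int) -> int:
--   # Write your code here
--   result = 0
--   p = 0
--   a = 0
--   b = 0
--   for p in range(N):
--     for a in range(N):
--       if p == a:
--         pass
--       else:
--         for b in range(N):
--           if a == b:
--             pass
--           else:
--             d1 = abs(p - a)
--             d2 = abs(a - b)
--             if (p - a) * (a - b) > 0 and C[p] == 'P' and C[a] == 'A' and C[b] == 'B' and X <= d1 and d1 <= Y and X <= d2 and d2 <= Y: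
--               result += 1
--   return result
-- ===== SOURCE B (Python) =====
-- def getArtisticPhotographCount(N: int, C: str, X: int, Y: int) -> int:
--   # Per 'A' position, count eligible P's and B's in each side window once,
--   # then combine by multiplication (left-P * right-B + right-P * left-B).
--   lo = max(X, 1)  # a distance is at least 1
--   result = 0
--   for a in range(N):
--     if C[a] == 'A':
--       lP = 0
--       lB = 0
--       rP = 0
--       rB = 0
--       for i in range(N):
--         if a - Y <= i and i <= a - lo:
--           if C[i] == 'P':
--             lP += 1
--           if C[i] == 'B':
--             lB += 1
--         elif a + lo <= i and i <= a + Y: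
--           if C[i] == 'P':
--             rP += 1
--           if C[i] == 'B':
--             rB += 1
--       result += lP * rB + rP * lB
--   return result
-- ===== Notes on version B (the rewrite author's own statement) =====
-- stated objective: faster
-- what changed: Replaced the O(N^3) triple loop over (p,a,b) by a per-'A' factorization: for each index a one pass counts eligible 'P' and 'B' positions in the left and right distance windows and the triple count is leftP*rightB + rightP*leftB.
-- outside the precondition, e.g. on getArtisticPhotographCount(2, '', 0, 1): A returns 0, B raises IndexError
import Mathlib
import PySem

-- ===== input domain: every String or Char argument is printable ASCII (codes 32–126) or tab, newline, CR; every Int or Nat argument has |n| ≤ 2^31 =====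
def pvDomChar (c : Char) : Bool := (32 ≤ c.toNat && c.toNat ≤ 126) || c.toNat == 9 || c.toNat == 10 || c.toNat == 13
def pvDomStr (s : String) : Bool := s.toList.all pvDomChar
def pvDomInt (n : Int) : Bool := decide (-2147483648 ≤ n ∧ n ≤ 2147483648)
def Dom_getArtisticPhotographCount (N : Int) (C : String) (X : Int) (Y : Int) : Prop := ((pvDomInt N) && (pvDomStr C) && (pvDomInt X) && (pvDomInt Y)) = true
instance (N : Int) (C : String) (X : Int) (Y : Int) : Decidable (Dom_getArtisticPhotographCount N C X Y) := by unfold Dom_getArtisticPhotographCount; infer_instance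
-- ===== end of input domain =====

-- B replaces A's O(N^3) triple loop by a per-'A' window-count factorization (measured faster; asymptotically O(N^2) vs O(N^3)).


-- ===== PORT A =====
def getArtisticPhotographCount (N : Int) (C : String) (X : Int) (Y : Int) : Int :=
  (PySem.List.pyRange 0 N).foldl (fun result p =>
    (PySem.List.pyRange 0 N).foldl (fun result a =>
      if p = a then result
      else
        (PySem.List.pyRange 0 N).foldl (fun result b =>
          if a = b then result
          else
            let d1 := |p - a|
            let d2 := |a - b|
            if (p - a) * (a - b) > 0 ∧ PySem.Str.pyGet? C p = some 'P' ∧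
               PySem.Str.pyGet? C a = some 'A' ∧ PySem.Str.pyGet? C b = some 'B' ∧
               X ≤ d1 ∧ d1 ≤ Y ∧ X ≤ d2 ∧ d2 ≤ Y
            then result + 1 else result) result) result) 0

-- ===== PORT B =====
def getArtisticPhotographCount_alt (N : Int) (C : String) (X : Int) (Y : Int) : Int :=
  let lo := max X 1
  (PySem.List.pyRange 0 N).foldl (fun result a =>
    if PySem.Str.pyGet? C a = some 'A' then
      let s := (PySem.List.pyRange 0 N).foldl
        (fun (st : Int × Int × Int × Int) i =>
          if a - Y ≤ i ∧ i ≤ a - lo then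
            ((if PySem.Str.pyGet? C i = some 'P' then st.1 + 1 else st.1),
             (if PySem.Str.pyGet? C i = some 'B' then st.2.1 + 1 else st.2.1),
             st.2.2.1, st.2.2.2)
          else if a + lo ≤ i ∧ i ≤ a + Y then
            (st.1, st.2.1,
             (if PySem.Str.pyGet? C i = some 'P' then st.2.2.1 + 1 else st.2.2.1),
             (if PySem.Str.pyGet? C i = some 'B' then st.2.2.2 + 1 else st.2.2.2))
          else st) ((0 : Int), (0 : Int), (0 : Int), (0 : Int))
      result + (s.1 * s.2.2.2 + s.2.2.1 * s.2.1)
    else result) 0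

-- ===== PRECONDITION & SPEC =====
-- Pre_ excludes N > len(C): there Python A raises IndexError for N ≥ 3; for N ≤ 2 it happens
-- to return 0 only because its short-circuited condition never reaches an out-of-range C[i],
-- while B indexes C[a] directly and raises.
def Pre_getArtisticPhotographCount (N : Int) (C : String) (X : Int) (Y : Int) : Prop :=
  N ≤ PySem.Str.len C
instance (N : Int) (C : String) (X : Int) (Y : Int) : Decidable (Pre_getArtisticPhotographCount N C X Y) := by unfold Pre_getArtisticPhotographCount; infer_instance
def pvWitness_getArtisticPhotographCount : Int × String × Int × Int := (3, "PAB", 1, 2)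

def Spec_getArtisticPhotographCount (N : Int) (C : String) (X : Int) (Y : Int) (out : Int) : Prop := out = getArtisticPhotographCount_alt N C X Y
instance (N : Int) (C : String) (X : Int) (Y : Int) (out : Int) : Decidable (Spec_getArtisticPhotographCount N C X Y out) := by unfold Spec_getArtisticPhotographCount; infer_instance

-- ===== CLAIM (what is proved, stated in full; the proofs are below) =====
def Claim_equal_getArtisticPhotographCount : Prop := ∀ (N : Int) (C : String) (X : Int) (Y : Int), Dom_getArtisticPhotographCount N C X Y → Pre_getArtisticPhotographCount N C X Y → Spec_getArtisticPhotographCount N C X Y (getArtisticPhotographCount N C X Y)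

-- ===== LEMMAS AND PROOFS =====

-- helper: loop bodies that add a per-element contribution are sums
theorem pvFoldlAdd {M : Type} [AddCommMonoid M] {β : Type} (body : M → β → M) (g : β → M)
    (h : ∀ r x, body r x = r + g x) (l : List β) : ∀ r : M, l.foldl body r = r + (l.map g).sum := by
  induction l with
  | nil => intro r; simp
  | cons x t ih => intro r; rw [List.foldl_cons, h, ih, List.map_cons, List.sum_cons, add_assoc]

theorem pvSumMapRange (n : ℕ) (f : ℕ → ℤ) :
    ((List.range n).map f).sum = ∑ i ∈ Finset.range n, f i := by
  induction n with
  | zero => simp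
  | succ n ih => rw [List.range_succ, List.map_append, List.sum_append,
      Finset.sum_range_succ, ih]; simp

theorem pvSumMk4 {β : Type} (g1 g2 g3 g4 : β → ℤ) (l : List β) :
    (l.map (fun x => ((g1 x, g2 x, g3 x, g4 x) : ℤ×ℤ×ℤ×ℤ))).sum
      = ((l.map g1).sum, (l.map g2).sum, (l.map g3).sum, (l.map g4).sum) := by
  induction l with
  | nil => rfl
  | cons x t ih => simp [ih, Prod.ext_iff]

-- the body of A's innermost loop as a per-(p,a,b) contribution
def pvGI (C : String) (X Y p a b : Int) : Int :=
  if a = b then 0 else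
  if (p - a) * (a - b) > 0 ∧ PySem.Str.pyGet? C p = some 'P' ∧
     PySem.Str.pyGet? C a = some 'A' ∧ PySem.Str.pyGet? C b = some 'B' ∧
     X ≤ |p - a| ∧ |p - a| ≤ Y ∧ X ≤ |a - b| ∧ |a - b| ≤ Y then 1 else 0

-- window indicator used by B
def pvIndW (C : String) (c : Char) (l r i : Int) : Int :=
  if l ≤ i ∧ i ≤ r ∧ PySem.Str.pyGet? C i = some c then 1 else 0

theorem pvA_eq (N : Int) (C : String) (X Y : Int) :
    getArtisticPhotographCount N C X Y =
      ((PySem.List.pyRange 0 N).map (fun p =>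
        ((PySem.List.pyRange 0 N).map (fun a =>
          if p = a then 0 else
            ((PySem.List.pyRange 0 N).map (pvGI C X Y p a)).sum)).sum)).sum := by
  unfold getArtisticPhotographCount
  have hinner : ∀ p a r : Int,
      (PySem.List.pyRange 0 N).foldl (fun result b =>
        if a = b then result
        else
          let d1 := |p - a|
          let d2 := |a - b|
          if (p - a) * (a - b) > 0 ∧ PySem.Str.pyGet? C p = some 'P' ∧
             PySem.Str.pyGet? C a = some 'A' ∧ PySem.Str.pyGet? C b = some 'B' ∧
             X ≤ d1 ∧ d1 ≤ Y ∧ X ≤ d2 ∧ d2 ≤ Y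
          then result + 1 else result) r
      = r + ((PySem.List.pyRange 0 N).map (pvGI C X Y p a)).sum := by
    intro p a r
    refine pvFoldlAdd _ _ ?_ _ r
    intro r b; unfold pvGI; dsimp only; split_ifs <;> ring
  have hmid : ∀ p r : Int,
      (PySem.List.pyRange 0 N).foldl (fun result a =>
        if p = a then result
        else
          (PySem.List.pyRange 0 N).foldl (fun result b =>
            if a = b then result
            else
              let d1 := |p - a|
              let d2 := |a - b|
              if (p - a) * (a - b) > 0 ∧ PySem.Str.pyGet? C p = some 'P' ∧
                 PySem.Str.pyGet? C a = some 'A' ∧ PySem.Str.pyGet? C b = some 'B' ∧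
                 X ≤ d1 ∧ d1 ≤ Y ∧ X ≤ d2 ∧ d2 ≤ Y
              then result + 1 else result) result) r
      = r + ((PySem.List.pyRange 0 N).map (fun a =>
          if p = a then 0 else ((PySem.List.pyRange 0 N).map (pvGI C X Y p a)).sum)).sum := by
    intro p r
    refine pvFoldlAdd _ _ ?_ _ r
    intro r a
    split_ifs with h
    · ring
    · rw [hinner]
  rw [pvFoldlAdd _ _ (fun r p => hmid p r), zero_add]

theorem pvB_eq (N : Int) (C : String) (X Y : Int) :
    getArtisticPhotographCount_alt N C X Y =
      ((PySem.List.pyRange 0 N).map (fun a =>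
        if PySem.Str.pyGet? C a = some 'A' then
          ((PySem.List.pyRange 0 N).map (pvIndW C 'P' (a - Y) (a - max X 1))).sum *
            ((PySem.List.pyRange 0 N).map (pvIndW C 'B' (a + max X 1) (a + Y))).sum +
          ((PySem.List.pyRange 0 N).map (pvIndW C 'P' (a + max X 1) (a + Y))).sum *
            ((PySem.List.pyRange 0 N).map (pvIndW C 'B' (a - Y) (a - max X 1))).sum
        else 0)).sum := by
  unfold getArtisticPhotographCount_alt
  have htup : ∀ a : Int,
      (PySem.List.pyRange 0 N).foldl
        (fun (st : Int × Int × Int × Int) i =>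
          if a - Y ≤ i ∧ i ≤ a - max X 1 then
            ((if PySem.Str.pyGet? C i = some 'P' then st.1 + 1 else st.1),
             (if PySem.Str.pyGet? C i = some 'B' then st.2.1 + 1 else st.2.1),
             st.2.2.1, st.2.2.2)
          else if a + max X 1 ≤ i ∧ i ≤ a + Y then
            (st.1, st.2.1,
             (if PySem.Str.pyGet? C i = some 'P' then st.2.2.1 + 1 else st.2.2.1),
             (if PySem.Str.pyGet? C i = some 'B' then st.2.2.2 + 1 else st.2.2.2))
          else st) ((0 : Int), (0 : Int), (0 : Int), (0 : Int))
      = (((PySem.List.pyRange 0 N).map (pvIndW C 'P' (a - Y) (a - max X 1))).sum,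
         ((PySem.List.pyRange 0 N).map (pvIndW C 'B' (a - Y) (a - max X 1))).sum,
         ((PySem.List.pyRange 0 N).map (pvIndW C 'P' (a + max X 1) (a + Y))).sum,
         ((PySem.List.pyRange 0 N).map (pvIndW C 'B' (a + max X 1) (a + Y))).sum) := by
    intro a
    have hbody : ∀ (st : Int × Int × Int × Int) (i : Int),
        (if a - Y ≤ i ∧ i ≤ a - max X 1 then
            ((if PySem.Str.pyGet? C i = some 'P' then st.1 + 1 else st.1),
             (if PySem.Str.pyGet? C i = some 'B' then st.2.1 + 1 else st.2.1),
             st.2.2.1, st.2.2.2)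
          else if a + max X 1 ≤ i ∧ i ≤ a + Y then
            (st.1, st.2.1,
             (if PySem.Str.pyGet? C i = some 'P' then st.2.2.1 + 1 else st.2.2.1),
             (if PySem.Str.pyGet? C i = some 'B' then st.2.2.2 + 1 else st.2.2.2))
          else st)
        = st + (pvIndW C 'P' (a - Y) (a - max X 1) i,
                pvIndW C 'B' (a - Y) (a - max X 1) i,
                pvIndW C 'P' (a + max X 1) (a + Y) i,
                pvIndW C 'B' (a + max X 1) (a + Y) i) := by
      intro st i
      obtain ⟨s1, s2, s3, s4⟩ := st
      unfold pvIndW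
      dsimp only
      by_cases hP : PySem.Str.pyGet? C i = some 'P' <;>
        by_cases hB : PySem.Str.pyGet? C i = some 'B' <;>
        simp only [hP, hB, Prod.mk_add_mk, Prod.mk.injEq, eq_self_iff_true, true_and, and_true,
          false_and, and_false, if_false, reduceCtorEq, Option.some.injEq, reduceIte] <;>
        split_ifs <;> simp_all <;> omega
    rw [pvFoldlAdd _ _ hbody _ _, pvSumMk4]
    simp [Prod.mk_add_mk]
  rw [pvFoldlAdd _ _ ?_ _ 0, zero_add]
  intro r a
  dsimp only
  split_ifs with h
  · rw [htup]
  · ring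

theorem pvPointwise (C : String) (X Y lo p a b : Int)
    (hlo : lo = max X 1) (hA : PySem.Str.pyGet? C a = some 'A') (hpa : p ≠ a) :
    pvGI C X Y p a b
    = pvIndW C 'P' (a - Y) (a - lo) p * pvIndW C 'B' (a + lo) (a + Y) b
      + pvIndW C 'P' (a + lo) (a + Y) p * pvIndW C 'B' (a - Y) (a - lo) b := by
  have hprod : (p - a) * (a - b) > 0 ↔ (p < a ∧ a < b) ∨ (a < p ∧ b < a) := by
    rw [gt_iff_lt, mul_pos_iff]; omega
  have habs : ∀ u v : Int, (u ≤ v ∧ |u - v| = v - u) ∨ (v ≤ u ∧ |u - v| = u - v) := by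
    intro u v; rcases le_total u v with h | h
    · exact Or.inl ⟨h, by rw [abs_sub_comm, abs_of_nonneg (by omega)]⟩
    · exact Or.inr ⟨h, by rw [abs_of_nonneg (by omega)]⟩
  have hd1 := habs p a
  have hd2 := habs a b
  unfold pvGI pvIndW
  by_cases hP : PySem.Str.pyGet? C p = some 'P' <;>
    by_cases hB : PySem.Str.pyGet? C b = some 'B' <;>
    simp only [hprod, hA, hP, hB, true_and, and_true, false_and, and_false, if_false] <;>
    generalize hg1 : |p - a| = d1 at hd1 ⊢ <;>
    generalize hg2 : |a - b| = d2 at hd2 ⊢ <;>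
    split_ifs <;> omega

theorem pvKey (C : String) (X Y lo : Int) (n : ℕ) (hlo : lo = max X 1) :
    (∑ p ∈ Finset.range n, ∑ a ∈ Finset.range n,
      (if (p : ℤ) = (a : ℤ) then 0 else ∑ b ∈ Finset.range n, pvGI C X Y p a b))
    = ∑ a ∈ Finset.range n,
        (if PySem.Str.pyGet? C a = some 'A' then
          (∑ i ∈ Finset.range n, pvIndW C 'P' ((a : ℤ) - Y) ((a : ℤ) - lo) i) *
            (∑ i ∈ Finset.range n, pvIndW C 'B' ((a : ℤ) + lo) ((a : ℤ) + Y) i) +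
          (∑ i ∈ Finset.range n, pvIndW C 'P' ((a : ℤ) + lo) ((a : ℤ) + Y) i) *
            (∑ i ∈ Finset.range n, pvIndW C 'B' ((a : ℤ) - Y) ((a : ℤ) - lo) i)
        else 0) := by
  rw [Finset.sum_comm]
  refine Finset.sum_congr rfl ?_
  intro a _
  by_cases hA : PySem.Str.pyGet? C (a : ℤ) = some 'A'
  · rw [if_pos hA]
    have hterm : ∀ p ∈ Finset.range n,
        (if (p : ℤ) = (a : ℤ) then 0 else ∑ b ∈ Finset.range n, pvGI C X Y p a b)
        = pvIndW C 'P' ((a : ℤ) - Y) ((a : ℤ) - lo) p *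
            (∑ i ∈ Finset.range n, pvIndW C 'B' ((a : ℤ) + lo) ((a : ℤ) + Y) i) +
          pvIndW C 'P' ((a : ℤ) + lo) ((a : ℤ) + Y) p *
            (∑ i ∈ Finset.range n, pvIndW C 'B' ((a : ℤ) - Y) ((a : ℤ) - lo) i) := by
      intro p _
      by_cases hpa : (p : ℤ) = (a : ℤ)
      · rw [if_pos hpa]
        have h1 : pvIndW C 'P' ((a : ℤ) - Y) ((a : ℤ) - lo) p = 0 := by
          unfold pvIndW; rw [if_neg]; rw [hpa, hA]; simp
        have h2 : pvIndW C 'P' ((a : ℤ) + lo) ((a : ℤ) + Y) p = 0 := by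
          unfold pvIndW; rw [if_neg]; rw [hpa, hA]; simp
        rw [h1, h2]; ring
      · rw [if_neg hpa]
        calc ∑ b ∈ Finset.range n, pvGI C X Y (p : ℤ) (a : ℤ) (b : ℤ)
            = ∑ b ∈ Finset.range n,
                (pvIndW C 'P' ((a : ℤ) - Y) ((a : ℤ) - lo) p *
                   pvIndW C 'B' ((a : ℤ) + lo) ((a : ℤ) + Y) b +
                 pvIndW C 'P' ((a : ℤ) + lo) ((a : ℤ) + Y) p *
                   pvIndW C 'B' ((a : ℤ) - Y) ((a : ℤ) - lo) b) :=
              Finset.sum_congr rfl (fun b _ => pvPointwise C X Y lo p a b hlo hA hpa)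
          _ = _ := by rw [Finset.sum_add_distrib, ← Finset.mul_sum, ← Finset.mul_sum]
    calc (∑ p ∈ Finset.range n,
          (if (p : ℤ) = (a : ℤ) then 0 else ∑ b ∈ Finset.range n, pvGI C X Y p a b))
        = ∑ p ∈ Finset.range n,
            (pvIndW C 'P' ((a : ℤ) - Y) ((a : ℤ) - lo) p *
               (∑ i ∈ Finset.range n, pvIndW C 'B' ((a : ℤ) + lo) ((a : ℤ) + Y) i) +
             pvIndW C 'P' ((a : ℤ) + lo) ((a : ℤ) + Y) p *
               (∑ i ∈ Finset.range n, pvIndW C 'B' ((a : ℤ) - Y) ((a : ℤ) - lo) i)) :=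
          Finset.sum_congr rfl hterm
      _ = _ := by rw [Finset.sum_add_distrib, ← Finset.sum_mul, ← Finset.sum_mul]
  · rw [if_neg hA]
    refine Finset.sum_eq_zero ?_
    intro p _
    split_ifs with h
    · rfl
    · refine Finset.sum_eq_zero ?_
      intro b _
      unfold pvGI
      split_ifs with h1 h2
      · rfl
      · exact absurd h2.2.2.1 hA
      · rfl

theorem pvMain (N : Int) (C : String) (X Y : Int) :
    getArtisticPhotographCount N C X Y = getArtisticPhotographCount_alt N C X Y := by
  rw [pvA_eq, pvB_eq]
  by_cases hN : N ≤ 0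
  · have he : PySem.List.pyRange 0 N = [] := by simp [PySem.List.pyRange]; omega
    rw [he]; simp
  · have hn : ((N.toNat : ℕ) : ℤ) = N := Int.toNat_of_nonneg (by omega)
    rw [← hn, PySem.List.pyRange_zero_natCast]
    simp only [List.map_map, Function.comp_def, pvSumMapRange]
    exact pvKey C X Y (max X 1) N.toNat rfl

-- ===== VERDICT (by name: the statement is the Claim_ definition above) =====
theorem getArtisticPhotographCount_spec : Claim_equal_getArtisticPhotographCount := by
  intro N C X Y _ _
  exact pvMain N C X Y
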